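-- pv_equiv track=rewrite | github.com/akaaaafk/Mem0 | mem0/scratch/eval_locomo_mem0_full.py | build_messages_for_speaker
-- ===== SOURCE A (Python) =====
-- def build_messages_for_speaker(conv: dict, speaker_a: str, speaker_b: str, session_key: str):
--     chats = conv.get(session_key) or []
--     messages_a = []
--     messages_b = []
--     for turn in chats:
--         speaker = turn.get("speaker", "")
--         text = (turn.get("text") or "").strip()
--         if not text:
--             continue
--         content = f"{speaker}: {text}"
--         if speaker == speaker_a:
--             messages_a.append({"role": "user", "content": content})
--             messages_b.append({"role": "assistant", "content": content})
--         elif speaker == speaker_b: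
--             messages_a.append({"role": "assistant", "content": content})
--             messages_b.append({"role": "user", "content": content})
--     return messages_a, messages_b
-- ===== SOURCE B (Python) =====
-- def build_messages_for_speaker(conv: dict, speaker_a: str, speaker_b: str, session_key: str):
--     # Stage 1: extract a neutral intermediate token list (who-spoke flag, rendered content),
--     # independent of any chat role. Stage 2: render each output list from the tokens with
--     # a role table; neither output list is built during the scan over the chats.
--     tokens = []
--     for turn in (conv.get(session_key) or []):
--         speaker = turn.get("speaker", "")
--         text = (turn.get("text") or "").strip()
--         if text and speaker in (speaker_a, speaker_b):
--             tokens.append((speaker == speaker_a, f"{speaker}: {text}"))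
--
--     def render(role_if_a, role_if_b):
--         return [{"role": role_if_a if is_a else role_if_b, "content": c}
--                 for is_a, c in tokens]
--
--     return render("user", "assistant"), render("assistant", "user")
-- ===== Notes on version B (the rewrite author's own statement) =====
-- stated objective: alternative
-- what changed: B replaces A's single loop that appends to both role lists with a staged pipeline: one extraction pass builds a neutral token list (speaker flag, content), and each output list is then rendered from the tokens by a shared render function with a role table.
import Mathlib
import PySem

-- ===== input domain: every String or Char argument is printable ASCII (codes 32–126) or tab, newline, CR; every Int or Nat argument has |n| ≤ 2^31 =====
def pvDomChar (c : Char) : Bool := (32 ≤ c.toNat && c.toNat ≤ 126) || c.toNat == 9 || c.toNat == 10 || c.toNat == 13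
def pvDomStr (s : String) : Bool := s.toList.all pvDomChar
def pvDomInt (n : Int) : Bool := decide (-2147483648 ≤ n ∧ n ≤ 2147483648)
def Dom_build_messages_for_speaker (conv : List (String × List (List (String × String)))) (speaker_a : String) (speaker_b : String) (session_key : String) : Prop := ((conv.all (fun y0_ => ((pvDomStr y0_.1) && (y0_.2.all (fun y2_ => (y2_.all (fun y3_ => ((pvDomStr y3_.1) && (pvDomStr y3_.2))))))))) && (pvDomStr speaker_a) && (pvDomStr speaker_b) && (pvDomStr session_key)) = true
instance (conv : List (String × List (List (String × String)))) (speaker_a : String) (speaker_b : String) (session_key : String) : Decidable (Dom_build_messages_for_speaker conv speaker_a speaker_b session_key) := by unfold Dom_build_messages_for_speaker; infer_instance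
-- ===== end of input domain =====

-- ===== PORT A =====
-- B differs from A in structure: A builds both role lists during one loop; B first extracts a
-- neutral token list, then renders each output list from it with a role table.
def build_messages_for_speaker (conv : List (String × List (List (String × String)))) (speaker_a : String) (speaker_b : String) (session_key : String) : (List (List (String × String))) × (List (List (String × String))) :=
  let chats := (conv.lookup session_key).getD []
  chats.foldl (fun st turn =>
    let speaker := (turn.lookup "speaker").getD ""
    let text := PySem.Str.strip ((turn.lookup "text").getD "")
    if text = "" then st
    else
      let content := speaker ++ ": " ++ text
      if speaker = speaker_a then
        (st.1 ++ [[("role", "user"), ("content", content)]],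
         st.2 ++ [[("role", "assistant"), ("content", content)]])
      else if speaker = speaker_b then
        (st.1 ++ [[("role", "assistant"), ("content", content)]],
         st.2 ++ [[("role", "user"), ("content", content)]])
      else st) ([], [])

-- ===== PORT B =====
def pvRender (tokens : List (Bool × String)) (role_if_a role_if_b : String) : List (List (String × String)) :=
  tokens.map (fun t => [("role", if t.1 then role_if_a else role_if_b), ("content", t.2)])

def build_messages_for_speaker_alt (conv : List (String × List (List (String × String)))) (speaker_a : String) (speaker_b : String) (session_key : String) : (List (List (String × String))) × (List (List (String × String))) :=
  let chats := (conv.lookup session_key).getD []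
  let tokens := chats.foldl (fun acc turn =>
    let speaker := (turn.lookup "speaker").getD ""
    let text := PySem.Str.strip ((turn.lookup "text").getD "")
    if text ≠ "" ∧ (speaker = speaker_a ∨ speaker = speaker_b) then
      acc ++ [(decide (speaker = speaker_a), speaker ++ ": " ++ text)]
    else acc) []
  (pvRender tokens "user" "assistant", pvRender tokens "assistant" "user")

-- ===== PRECONDITION & SPEC =====
def Spec_build_messages_for_speaker (conv : List (String × List (List (String × String)))) (speaker_a : String) (speaker_b : String) (session_key : String) (out : (List (List (String × String))) × (List (List (String × String)))) : Prop := out = build_messages_for_speaker_alt conv speaker_a speaker_b session_key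
instance (conv : List (String × List (List (String × String)))) (speaker_a : String) (speaker_b : String) (session_key : String) (out : (List (List (String × String))) × (List (List (String × String)))) : Decidable (Spec_build_messages_for_speaker conv speaker_a speaker_b session_key out) := by unfold Spec_build_messages_for_speaker; infer_instance

-- ===== CLAIM (what is proved, stated in full; the proofs are below) =====
def Claim_equal_build_messages_for_speaker : Prop := ∀ (conv : List (String × List (List (String × String)))) (speaker_a : String) (speaker_b : String) (session_key : String), Dom_build_messages_for_speaker conv speaker_a speaker_b session_key → Spec_build_messages_for_speaker conv speaker_a speaker_b session_key (build_messages_for_speaker conv speaker_a speaker_b session_key)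

-- ===== LEMMAS AND PROOFS =====

def pvStepA (speaker_a speaker_b : String) (st : (List (List (String × String))) × (List (List (String × String)))) (turn : List (String × String)) : (List (List (String × String))) × (List (List (String × String))) :=
  let speaker := (turn.lookup "speaker").getD ""
  let text := PySem.Str.strip ((turn.lookup "text").getD "")
  if text = "" then st
  else
    let content := speaker ++ ": " ++ text
    if speaker = speaker_a then
      (st.1 ++ [[("role", "user"), ("content", content)]],
       st.2 ++ [[("role", "assistant"), ("content", content)]])
    else if speaker = speaker_b then
      (st.1 ++ [[("role", "assistant"), ("content", content)]],
       st.2 ++ [[("role", "user"), ("content", content)]])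
    else st

def pvStepTok (speaker_a speaker_b : String) (acc : List (Bool × String)) (turn : List (String × String)) : List (Bool × String) :=
  let speaker := (turn.lookup "speaker").getD ""
  let text := PySem.Str.strip ((turn.lookup "text").getD "")
  if text ≠ "" ∧ (speaker = speaker_a ∨ speaker = speaker_b) then
    acc ++ [(decide (speaker = speaker_a), speaker ++ ": " ++ text)]
  else acc

theorem pvStep_render (speaker_a speaker_b : String) (acc : List (Bool × String)) (turn : List (String × String)) :
    pvStepA speaker_a speaker_b (pvRender acc "user" "assistant", pvRender acc "assistant" "user") turn
      = (pvRender (pvStepTok speaker_a speaker_b acc turn) "user" "assistant",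
         pvRender (pvStepTok speaker_a speaker_b acc turn) "assistant" "user") := by
  simp only [pvStepA, pvStepTok]
  by_cases ht : PySem.Str.strip ((turn.lookup "text").getD "") = "" <;>
    by_cases ha : (turn.lookup "speaker").getD "" = speaker_a <;>
      by_cases hb : (turn.lookup "speaker").getD "" = speaker_b <;>
        simp [ht, ha, hb, pvRender] <;>
          simp [show ¬(speaker_b = speaker_a) from fun h => ha (hb.trans h)]

theorem pvFold_render (speaker_a speaker_b : String) (chats : List (List (String × String))) (acc : List (Bool × String)) :
    chats.foldl (pvStepA speaker_a speaker_b) (pvRender acc "user" "assistant", pvRender acc "assistant" "user")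
      = (pvRender (chats.foldl (pvStepTok speaker_a speaker_b) acc) "user" "assistant",
         pvRender (chats.foldl (pvStepTok speaker_a speaker_b) acc) "assistant" "user") := by
  induction chats generalizing acc with
  | nil => rfl
  | cons t ts ih =>
      simp only [List.foldl_cons, pvStep_render]
      exact ih _

-- ===== VERDICT (by name: the statement is the Claim_ definition above) =====
theorem build_messages_for_speaker_spec : Claim_equal_build_messages_for_speaker := by
  intro conv speaker_a speaker_b session_key _
  unfold Spec_build_messages_for_speaker build_messages_for_speaker build_messages_for_speaker_alt
  exact pvFold_render speaker_a speaker_b ((conv.lookup session_key).getD []) []
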